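-- pv_equiv track=rewrite | github.com/h4lfw1t/VS-Code | ITI 1120/LECTURES/lec14.1_matrixWriting.py | identity_matrix
-- ===== SOURCE A (Python) =====
-- def identity_matrix(m):
--     '''
--     (list)->bool
--     Returns True if m is an identity matrix (square matrix with ones on the diagonal and zeros elsewhere)
--     Precondition: m is a 2D matrix
--     '''
--     for i in range(len(m)):
--         if len(m)!=len(m[i]):
--             return False
--         for i in range(len(m)):
--             for j in range(len(m[i])):
--                 if i==j and m[i][j]!=1:
--                     return False
--                 elif i!=j and m[i][j]!=0:
--                     return False
--     return True
-- ===== SOURCE B (Python) =====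
-- def identity_matrix(m):
--     n = len(m)
--     for i, row in enumerate(m):
--         if len(row) != n:
--             return False
--         for j, v in enumerate(row):
--             if v != (1 if i == j else 0):
--                 return False
--     return True
-- ===== Notes on version B (the rewrite author's own statement) =====
-- stated objective: simpler
-- what changed: A reruns the full double entry scan inside its outer row loop (three nested loops, each entry checked n times); B is one enumerate pass that checks each row's length and each entry exactly once.
import Mathlib
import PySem

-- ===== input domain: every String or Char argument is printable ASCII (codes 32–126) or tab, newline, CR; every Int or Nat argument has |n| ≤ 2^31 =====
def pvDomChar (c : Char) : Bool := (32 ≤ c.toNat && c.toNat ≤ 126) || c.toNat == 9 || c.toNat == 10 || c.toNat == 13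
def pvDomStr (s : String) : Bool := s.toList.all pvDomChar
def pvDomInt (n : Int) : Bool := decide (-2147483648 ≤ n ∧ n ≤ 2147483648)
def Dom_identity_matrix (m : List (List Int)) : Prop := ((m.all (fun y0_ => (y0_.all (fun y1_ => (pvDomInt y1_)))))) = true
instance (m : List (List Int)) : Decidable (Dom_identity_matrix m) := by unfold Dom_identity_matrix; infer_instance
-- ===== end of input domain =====

-- B replaces A's triply nested repeated scan by a single pass checking each row length and entry once (simpler; same measured speed).


-- ===== PORT A =====
-- literal transliteration: outer loop checks row-i length, then reruns the full
-- double scan over all entries (indices from range(len) are always in range, so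
-- Python's m[i][j] never raises; getD is exact here)
def identity_matrix (m : List (List Int)) : Bool :=
  (List.range m.length).all (fun i =>
    if m.length ≠ (m.getD i []).length then false
    else
      (List.range m.length).all (fun i' =>
        (List.range (m.getD i' []).length).all (fun j =>
          if i' = j ∧ (m.getD i' []).getD j 0 ≠ 1 then false
          else if i' ≠ j ∧ (m.getD i' []).getD j 0 ≠ 0 then false
          else true)))

-- ===== PORT B =====
def altEntries (i j : Nat) : List Int → Bool
  | [] => true
  | v :: vs => (v == (if i == j then 1 else 0)) && altEntries i (j+1) vs

def altGo (n i : Nat) : List (List Int) → Bool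
  | [] => true
  | row :: rs => (row.length == n) && altEntries i 0 row && altGo n (i+1) rs

def identity_matrix_alt (m : List (List Int)) : Bool :=
  altGo m.length 0 m

-- ===== PRECONDITION & SPEC =====
def Spec_identity_matrix (m : List (List Int)) (out : Bool) : Prop := out = identity_matrix_alt m
instance (m : List (List Int)) (out : Bool) : Decidable (Spec_identity_matrix m out) := by unfold Spec_identity_matrix; infer_instance

-- ===== CLAIM (what is proved, stated in full; the proofs are below) =====
def Claim_equal_identity_matrix : Prop := ∀ (m : List (List Int)), Dom_identity_matrix m → Spec_identity_matrix m (identity_matrix m)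

-- ===== LEMMAS AND PROOFS =====

theorem altEntries_iff (i j : Nat) (row : List Int) :
    altEntries i j row = true ↔
      ∀ k, k < row.length → row.getD k 0 = (if i = j + k then 1 else 0) := by
  induction row generalizing j with
  | nil => simp [altEntries]
  | cons v vs ih =>
    simp only [altEntries, Bool.and_eq_true, beq_iff_eq, ih]
    constructor
    · rintro ⟨h0, h⟩ k hk
      cases k with
      | zero => simpa using h0
      | succ k =>
        have hh := h k (by simpa using Nat.lt_of_succ_lt_succ hk)
        rw [show j + (k+1) = j + 1 + k from by omega]
        simpa using hh
    · intro h
      refine ⟨by simpa using h 0 (Nat.succ_pos _), fun k hk => ?_⟩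
      have hh := h (k+1) (by simpa using Nat.succ_lt_succ hk)
      rw [show j + 1 + k = j + (k+1) from by omega]
      simpa using hh

theorem altGo_iff (n i : Nat) (rows : List (List Int)) :
    altGo n i rows = true ↔
      ∀ k, k < rows.length →
        (rows.getD k []).length = n ∧ altEntries (i + k) 0 (rows.getD k []) = true := by
  induction rows generalizing i with
  | nil => simp [altGo]
  | cons r rs ih =>
    simp only [altGo, Bool.and_eq_true, beq_iff_eq, ih]
    constructor
    · rintro ⟨⟨h0, h0'⟩, h⟩ k hk
      cases k with
      | zero => simpa using ⟨h0, h0'⟩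
      | succ k =>
        have hh := h k (by simpa using Nat.lt_of_succ_lt_succ hk)
        rw [show i + (k+1) = i + 1 + k from by omega]
        simpa using hh
    · intro h
      refine ⟨by simpa using h 0 (Nat.succ_pos _), fun k hk => ?_⟩
      have hh := h (k+1) (by simpa using Nat.succ_lt_succ hk)
      rw [show i + 1 + k = i + (k+1) from by omega]
      simpa using hh

-- entry-correctness of one row k, shared by both characterizations
def EntryOK (m : List (List Int)) (k : Nat) : Prop :=
  ∀ j, j < (m.getD k []).length → (m.getD k []).getD j 0 = (if k = j then 1 else 0)

theorem alt_iff (m : List (List Int)) :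
    identity_matrix_alt m = true ↔
      ∀ k, k < m.length → (m.getD k []).length = m.length ∧ EntryOK m k := by
  unfold identity_matrix_alt
  rw [altGo_iff]
  refine forall_congr' fun k => ?_
  refine imp_congr_right fun hk => and_congr_right fun _ => ?_
  rw [show 0 + k = k from by omega, altEntries_iff]
  simp [EntryOK]

theorem a_iff (m : List (List Int)) :
    identity_matrix m = true ↔
      ∀ k, k < m.length → (m.getD k []).length = m.length ∧ EntryOK m k := by
  unfold identity_matrix
  simp only [List.all_eq_true, List.mem_range]
  constructor
  · intro h k hk
    have hk' := h k hk
    by_cases hlen : m.length = (m.getD k []).length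
    · refine ⟨hlen.symm, ?_⟩
      rw [if_neg (by simp [hlen])] at hk'
      simp only [List.all_eq_true, List.mem_range] at hk'
      intro j hj
      have hthis := hk' k hk j hj
      by_cases hkj : k = j
      · simp only [if_pos hkj]
        by_contra hne
        rw [if_pos ⟨hkj, hne⟩] at hthis
        exact absurd hthis (by simp)
      · simp only [if_neg hkj]
        by_contra hne
        rw [if_neg (by tauto), if_pos ⟨hkj, hne⟩] at hthis
        exact absurd hthis (by simp)
    · exfalso
      rw [if_pos hlen] at hk'
      exact absurd hk' (by simp)
  · intro h i hi
    rw [if_neg (by simp only [ne_eq, not_not]; exact (h i hi).1.symm)]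
    simp only [List.all_eq_true, List.mem_range]
    intro i' hi' j hj
    have hE := (h i' hi').2 j hj
    by_cases hkj : i' = j
    · rw [if_pos hkj] at hE
      rw [if_neg (by tauto), if_neg (by tauto)]
    · rw [if_neg hkj] at hE
      rw [if_neg (by tauto), if_neg (by tauto)]

-- ===== VERDICT (by name: the statement is the Claim_ definition above) =====
theorem identity_matrix_spec : Claim_equal_identity_matrix := by
  intro m _
  unfold Spec_identity_matrix
  have h1 := a_iff m
  have h2 := alt_iff m
  cases hA : identity_matrix m <;> cases hB : identity_matrix_alt m <;> simp_all
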